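-- pv_equiv track=rewrite | github.com/SharpBit/adventofcode | 2020/2020-06.py | get_group_indexes
-- ===== SOURCE A (Python) =====
-- def get_group_indexes(input_lines):
--     group_indexes = []
--     for i, line in enumerate(input_lines):
--         if i == 0 or input_lines[i - 1] == '':  # beginning of a group
--             group_indexes.append([i, None])
--         if i == len(input_lines) - 1 or input_lines[i + 1] == '':  # end of a group
--             group_indexes[-1][1] = i
--
--     return group_indexes
-- ===== SOURCE B (Python) =====
-- def get_group_indexes(input_lines):
--     n = len(input_lines)
--     # index of group starts, built first
--     starts = [i for i in range(n) if i == 0 or input_lines[i - 1] == '']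
--     out = []
--     for k, s in enumerate(starts):
--         nxt = starts[k + 1] if k + 1 < len(starts) else n
--         end = s  # scan the group's own range for its last end line
--         for i in range(s, nxt):
--             if i == n - 1 or input_lines[i + 1] == '':
--                 end = i
--         out.append([s, end])
--     return out
-- ===== Notes on version B (the rewrite author's own statement) =====
-- stated objective: alternative
-- what changed: B first builds the list of group-start indexes, then for each start scans only that group's index range for its last end line, instead of A's single interleaved pass that appends and mutates the last group in place.
-- outside the precondition, e.g. on get_group_indexes(['', 'x']): A returns [[0, None], [1, 1]], B returns [[0, 0], [1, 1]]
import Mathlib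
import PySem

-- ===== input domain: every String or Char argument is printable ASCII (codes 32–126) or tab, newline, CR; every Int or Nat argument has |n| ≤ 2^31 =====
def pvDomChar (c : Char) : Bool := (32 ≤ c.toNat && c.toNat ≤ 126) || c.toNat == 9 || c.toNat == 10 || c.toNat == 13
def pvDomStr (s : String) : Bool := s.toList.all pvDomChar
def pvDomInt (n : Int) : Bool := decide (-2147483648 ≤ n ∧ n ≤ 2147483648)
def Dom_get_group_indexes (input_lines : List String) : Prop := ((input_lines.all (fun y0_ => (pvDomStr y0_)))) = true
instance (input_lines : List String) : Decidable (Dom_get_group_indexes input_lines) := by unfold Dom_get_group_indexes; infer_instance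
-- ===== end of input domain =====

-- B separates start-detection (an index list built first) from a per-group end-scan,
-- instead of A's single interleaved pass mutating the last appended group ("alternative").


-- ===== PORT A =====
-- `i == 0 or input_lines[i-1] == ''` (guarded index is always in range; when i = 0 the
-- first disjunct already decides the Bool, so `getD` with default "" is exact)
def pvStartP (lines : List String) (i : Nat) : Bool := i == 0 || lines.getD (i - 1) "" == ""
-- `i == len(input_lines) - 1 or input_lines[i+1] == ''` (same guarded-index remark)
def pvEndP (lines : List String) (i : Nat) : Bool := i == lines.length - 1 || lines.getD (i + 1) "" == ""

-- `group_indexes[-1][1] = i` on a list of (start, optional end) pairs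
def pvSetLast (gs : List (Int × Option Int)) (v : Int) : List (Int × Option Int) :=
  match gs with
  | [] => []
  | [g] => [(g.1, some v)]
  | g :: h :: rest => g :: pvSetLast (h :: rest) v

-- literal port of A; Python's `None` end is rendered as -1 in the final lists
-- (Pre_ excludes exactly the inputs on which a None end survives)
def get_group_indexes (input_lines : List String) : List (List Int) :=
  let gs := (List.range input_lines.length).foldl (fun gs i =>
    let gs := if pvStartP input_lines i then gs ++ [((i : Int), (none : Option Int))] else gs
    if pvEndP input_lines i then pvSetLast gs (i : Int) else gs) []
  gs.map (fun g => [g.1, g.2.getD (-1)])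

-- ===== PORT B =====
def get_group_indexes_alt (input_lines : List String) : List (List Int) :=
  let n := input_lines.length
  let starts := (List.range n).filter (fun i => pvStartP input_lines i)
  (List.range starts.length).foldl (fun out k =>
    let s := starts.getD k 0
    let nxt := if k + 1 < starts.length then starts.getD (k + 1) 0 else n
    let e := (List.range' s (nxt - s)).foldl
      (fun e i => if pvEndP input_lines i then (i : Int) else e) ((s : Int))
    out ++ [[(s : Int), e]]) []

-- ===== PRECONDITION & SPEC =====
-- Pre_ excludes the inputs on which A's result contains a group end of None (not an int,
-- unrepresentable in List (List Int)): a blank line that starts a group and is immediately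
-- followed by a non-blank line.
def Pre_get_group_indexes (input_lines : List String) : Prop :=
  ∀ i ∈ List.range input_lines.length, i + 1 < input_lines.length →
    pvStartP input_lines i = true →
    input_lines.getD i "" = "" → input_lines.getD (i + 1) "" = ""
instance (input_lines : List String) : Decidable (Pre_get_group_indexes input_lines) := by
  unfold Pre_get_group_indexes; infer_instance
def pvWitness_get_group_indexes : List String := ["ab", "c", "", "d"]
def Spec_get_group_indexes (input_lines : List String) (out : List (List Int)) : Prop := out = get_group_indexes_alt input_lines
instance (input_lines : List String) (out : List (List Int)) : Decidable (Spec_get_group_indexes input_lines out) := by unfold Spec_get_group_indexes; infer_instance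

-- ===== CLAIM (what is proved, stated in full; the proofs are below) =====
def Claim_equal_get_group_indexes : Prop := ∀ (input_lines : List String), Dom_get_group_indexes input_lines → Pre_get_group_indexes input_lines → Spec_get_group_indexes input_lines (get_group_indexes input_lines)

-- ===== LEMMAS AND PROOFS =====

-- pair each start with the next start (or the overall bound M)
def pvPairs : List Nat → Nat → List (Nat × Nat)
  | [], _ => []
  | [s], M => [(s, M)]
  | s :: s' :: rest, M => (s, s') :: pvPairs (s' :: rest) M

def pvOptEnd (lines : List String) (s t : Nat) : Option Int :=
  (List.range' s (t - s)).foldl (fun e i => if pvEndP lines i then some (i : Int) else e) none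

def pvGroups (lines : List String) (m : Nat) : List (Int × Option Int) :=
  (pvPairs ((List.range m).filter (fun i => pvStartP lines i)) m).map
    (fun p => ((p.1 : Int), pvOptEnd lines p.1 p.2))

lemma pvPairs_append (ss : List Nat) (s M : Nat) :
    pvPairs (ss ++ [s]) M = pvPairs ss s ++ [(s, M)] := by
  induction ss with
  | nil => rfl
  | cons a tl ih =>
    cases tl with
    | nil => rfl
    | cons b tl' => simp [pvPairs] at ih ⊢; exact ih

lemma pvSetLast_append (xs : List (Int × Option Int)) (a : Int) (b : Option Int) (v : Int) :
    pvSetLast (xs ++ [(a, b)]) v = xs ++ [(a, some v)] := by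
  induction xs with
  | nil => rfl
  | cons g tl ih =>
    cases tl with
    | nil => rfl
    | cons h tl' => simpa [pvSetLast] using ih

lemma pvOptEnd_extend (lines : List String) (s m : Nat) (hs : s ≤ m) :
    pvOptEnd lines s (m + 1) =
      if pvEndP lines m then some (m : Int) else pvOptEnd lines s m := by
  unfold pvOptEnd
  have h1 : m + 1 - s = (m - s) + 1 := by omega
  have h2 : s + (m - s) = m := by omega
  rw [h1, List.range'_1_concat, List.foldl_append, h2]
  simp

-- extending the bound of a nonempty pairs list by one is exactly one step of A's loop
lemma pvGroups_ext (lines : List String) (ss : List Nat) (m : Nat)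
    (hne : ss ≠ []) (hb : ∀ s ∈ ss, s ≤ m) :
    (pvPairs ss (m + 1)).map (fun p => ((p.1 : Int), pvOptEnd lines p.1 p.2)) =
      (if pvEndP lines m
        then pvSetLast ((pvPairs ss m).map (fun p => ((p.1 : Int), pvOptEnd lines p.1 p.2))) (m : Int)
        else (pvPairs ss m).map (fun p => ((p.1 : Int), pvOptEnd lines p.1 p.2))) := by
  induction ss with
  | nil => exact absurd rfl hne
  | cons a tl ih =>
    cases tl with
    | nil =>
      have ha : a ≤ m := hb a (by simp)
      simp only [pvPairs, List.map_cons, List.map_nil, pvOptEnd_extend lines a m ha]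
      by_cases h : pvEndP lines m <;> simp [h, pvSetLast]
    | cons b tl' =>
      have hb' : ∀ s ∈ b :: tl', s ≤ m := fun s hs => hb s (by simp [hs])
      have ih' := ih (by simp) hb'
      have hcons : ∀ (g : Int × Option Int) (l : List (Int × Option Int)) (v : Int), l ≠ [] →
          pvSetLast (g :: l) v = g :: pvSetLast l v := by
        intro g l v hl
        cases l with
        | nil => exact absurd rfl hl
        | cons x xs => simp [pvSetLast]
      have hne' : (pvPairs (b :: tl') m).map
          (fun p => ((p.1 : Int), pvOptEnd lines p.1 p.2)) ≠ [] := by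
        cases tl' <;> simp [pvPairs]
      by_cases h : pvEndP lines m
      · rw [if_pos h] at ih'
        simp only [pvPairs, List.map_cons, if_pos h]
        rw [hcons _ _ _ hne', ih']
      · rw [if_neg h] at ih'
        simp only [pvPairs, List.map_cons, if_neg h]
        rw [ih']

lemma zero_mem_starts (lines : List String) (m : Nat) (hm : 0 < m) :
    0 ∈ (List.range m).filter (fun i => pvStartP lines i) := by
  simp [List.mem_filter, List.mem_range, hm, pvStartP]

-- A's loop invariant: after processing range m the state is pvGroups lines m
lemma A_invariant (lines : List String) (m : Nat) :
    (List.range m).foldl (fun gs i =>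
      let gs := if pvStartP lines i then gs ++ [((i : Int), (none : Option Int))] else gs
      if pvEndP lines i then pvSetLast gs (i : Int) else gs) [] = pvGroups lines m := by
  induction m with
  | zero => rfl
  | succ m ih =>
    rw [List.range_succ, List.foldl_append, ih]
    simp only [List.foldl_cons, List.foldl_nil]
    unfold pvGroups
    have hfilter : (List.range (m + 1)).filter (fun i => pvStartP lines i) =
        ((List.range m).filter (fun i => pvStartP lines i)) ++
          (if pvStartP lines m then [m] else []) := by
      rw [List.range_succ, List.filter_append]
      congr 1
      cases h : pvStartP lines m <;> simp [h]
    have hb : ∀ s ∈ (List.range m).filter (fun i => pvStartP lines i), s ≤ m := by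
      intro s hs
      have := List.mem_range.mp (List.mem_of_mem_filter hs)
      omega
    by_cases hst : pvStartP lines m
    · rw [hfilter]
      simp only [if_pos hst]
      rw [pvPairs_append, List.map_append]
      have hopt : pvOptEnd lines m (m + 1) =
          if pvEndP lines m then some (m : Int) else none := by
        have := pvOptEnd_extend lines m m (le_refl m)
        rw [this]
        have : pvOptEnd lines m m = none := by simp [pvOptEnd]
        rw [this]
      by_cases hen : pvEndP lines m
      · simp only [if_pos hen] at hopt ⊢
        rw [pvSetLast_append]
        simp [hopt]
      · simp only [if_neg hen] at hopt ⊢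
        simp [hopt]
    · have hm : 0 < m := by
        by_contra h
        have : m = 0 := by omega
        subst this
        simp [pvStartP] at hst
      rw [hfilter]
      simp only [if_neg hst, List.append_nil]
      have hne : (List.range m).filter (fun i => pvStartP lines i) ≠ [] :=
        List.ne_nil_of_mem (zero_mem_starts lines m hm)
      rw [pvGroups_ext lines _ m hne hb]

-- pvPairs written by index, matching B's loop body
lemma pvPairs_index (ss : List Nat) (M : Nat) :
    pvPairs ss M = (List.range ss.length).map
      (fun k => (ss.getD k 0, if k + 1 < ss.length then ss.getD (k + 1) 0 else M)) := by
  induction ss with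
  | nil => rfl
  | cons a tl ih =>
    cases tl with
    | nil => simp [pvPairs]
    | cons b tl' =>
      rw [show pvPairs (a :: b :: tl') M = (a, b) :: pvPairs (b :: tl') M from rfl, ih,
        show (a :: b :: tl').length = (b :: tl').length + 1 from rfl,
        List.range_succ_eq_map, List.map_cons, List.map_map]
      refine congrArg₂ (· :: ·) ?_ ?_
      · simp [List.getD]
      · apply List.map_congr_left
        intro k hk
        simp [Function.comp, List.getD]

-- B's append-loop is a map over range
lemma foldl_append_map {α β : Type} (g : α → β) (l : List α) (init : List β) :
    l.foldl (fun out k => out ++ [g k]) init = init ++ l.map g := by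
  induction l generalizing init with
  | nil => simp
  | cons a tl ih => simp [ih]

-- once the optional accumulator is `some`, the two folds stay in sync
lemma fold_sync (lines : List String) (l : List Nat) (a : Int) :
    l.foldl (fun e i => if pvEndP lines i then some (i : Int) else e) (some a) =
      some (l.foldl (fun e i => if pvEndP lines i then (i : Int) else e) a) := by
  induction l generalizing a with
  | nil => rfl
  | cons x tl ih => by_cases h : pvEndP lines x <;> simp [h, ih]

-- if some element of the range satisfies the end predicate, the optional fold of A
-- and the default-seeded fold of B agree
lemma fold_opt_eq_def (lines : List String) (l : List Nat) (d : Int)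
    (h : ∃ i ∈ l, pvEndP lines i = true) :
    l.foldl (fun e i => if pvEndP lines i then some (i : Int) else e) none =
      some (l.foldl (fun e i => if pvEndP lines i then (i : Int) else e) d) := by
  induction l generalizing d with
  | nil => simp at h
  | cons x tl ih =>
    by_cases hx : pvEndP lines x
    · simp [hx, fold_sync]
    · obtain ⟨i, hi, hpi⟩ := h
      rcases List.mem_cons.mp hi with hi | hi
      · subst hi; exact absurd hpi (by simp [hx])
      · simp only [List.foldl_cons, if_neg hx]
        exact ih d ⟨i, hi, hpi⟩

-- structural facts about the pairs of a sorted start list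
lemma pvPairs_mem (ss : List Nat) (M : Nat) (hsort : ss.Pairwise (· < ·))
    (hM : ∀ s ∈ ss, s < M) :
    ∀ p ∈ pvPairs ss M, p.1 ∈ ss ∧ p.1 < p.2 ∧ (p.2 = M ∨ p.2 ∈ ss) := by
  induction ss with
  | nil => intro p hp; simp [pvPairs] at hp
  | cons a tl ih =>
    cases tl with
    | nil =>
      intro p hp
      simp only [pvPairs, List.mem_singleton] at hp
      subst hp
      exact ⟨by simp, hM a (by simp), Or.inl rfl⟩
    | cons b tl' =>
      intro p hp
      simp only [pvPairs, List.mem_cons] at hp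
      rcases hp with hp | hp
      · subst hp
        refine ⟨by simp, ?_, Or.inr (by simp)⟩
        have := List.pairwise_cons.mp hsort
        exact this.1 b (by simp)
      · have htl : (b :: tl').Pairwise (· < ·) := (List.pairwise_cons.mp hsort).2
        have hM' : ∀ s ∈ b :: tl', s < M := fun s hs => hM s (by simp [hs])
        obtain ⟨h1, h2, h3⟩ := ih htl hM' p hp
        exact ⟨by simp [h1], h2, h3.imp id (fun h => by simp [h])⟩

-- under Pre_, every group [s, t) contains an end line
lemma group_has_end (lines : List String) (hpre : Pre_get_group_indexes lines)
    (s t : Nat) (hs : pvStartP lines s = true) (hst : s < t)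
    (ht : t = lines.length ∨ (t < lines.length ∧ pvStartP lines t = true)) :
    ∃ i ∈ List.range' s (t - s), pvEndP lines i = true := by
  rcases ht with ht | ⟨htlt, hts⟩
  · -- t = n: i = n - 1 works
    subst ht
    refine ⟨lines.length - 1, ?_, ?_⟩
    · rw [List.mem_range'_1]; omega
    · simp [pvEndP]
  · -- t is a start > 0, so lines[t-1] = ""
    have ht1 : 0 < t := by omega
    have hblank : lines.getD (t - 1) "" = "" := by
      simp only [pvStartP, Bool.or_eq_true, beq_iff_eq] at hts
      rcases hts with h | h
      · omega
      · exact h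
    by_cases hcase : s + 1 < t
    · -- i = t - 2
      refine ⟨t - 2, ?_, ?_⟩
      · rw [List.mem_range'_1]; omega
      · simp only [pvEndP, Bool.or_eq_true, beq_iff_eq]
        right
        have : t - 2 + 1 = t - 1 := by omega
        rw [this]; exact hblank
    · -- t = s + 1, so lines[s] = "" and Pre_ gives lines[s+1] = ""
      have hteq : t = s + 1 := by omega
      have hsblank : lines.getD s "" = "" := by
        have : s = t - 1 := by omega
        rw [this]; exact hblank
      have hnext := hpre s (List.mem_range.mpr (by omega)) (by omega) hs hsblank
      refine ⟨s, ?_, ?_⟩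
      · rw [List.mem_range'_1]; omega
      · simp only [pvEndP, Bool.or_eq_true, beq_iff_eq]
        right; exact hnext

-- ===== VERDICT (by name: the statement is the Claim_ definition above) =====
theorem get_group_indexes_spec : Claim_equal_get_group_indexes := by
  intro lines _hdom hpre
  unfold Spec_get_group_indexes get_group_indexes get_group_indexes_alt
  rw [A_invariant]
  set ss := (List.range lines.length).filter (fun i => pvStartP lines i) with hss
  have hsort : ss.Pairwise (· < ·) :=
    List.Pairwise.filter _ (List.pairwise_lt_range)
  have hMlt : ∀ s ∈ ss, s < lines.length := by
    intro s hs
    exact List.mem_range.mp (List.mem_of_mem_filter hs)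
  have hstart : ∀ s ∈ ss, pvStartP lines s = true := by
    intro s hs
    exact (List.mem_filter.mp hs).2
  -- rewrite B's loop into a map over pvPairs
  rw [foldl_append_map
    (fun k => [((ss.getD k 0 : Nat) : Int),
      (List.range' (ss.getD k 0)
          ((if k + 1 < ss.length then ss.getD (k + 1) 0 else lines.length) - ss.getD k 0)).foldl
        (fun e i => if pvEndP lines i then (i : Int) else e) ((ss.getD k 0 : Nat) : Int)])]
  unfold pvGroups
  rw [← hss, pvPairs_index, List.nil_append, List.map_map, List.map_map]
  apply List.map_congr_left
  intro k hk
  have hk' := List.mem_range.mp hk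
  simp only [Function.comp]
  set s := ss.getD k 0 with hsdef
  set t := (if k + 1 < ss.length then ss.getD (k + 1) 0 else lines.length) with htdef
  have hpmem : (s, t) ∈ pvPairs ss lines.length := by
    rw [pvPairs_index]
    exact List.mem_map.mpr ⟨k, hk, rfl⟩
  obtain ⟨hsm, hst, htm⟩ := pvPairs_mem ss lines.length hsort hMlt (s, t) hpmem
  have hex := group_has_end lines hpre s t (hstart s hsm) hst
    (htm.imp id (fun h => ⟨hMlt t h, hstart t h⟩))
  rw [pvOptEnd, fold_opt_eq_def lines _ ((s : Nat) : Int) hex]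
  simp
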